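-- pv_equiv track=rewrite | github.com/jwkice/581-Project_1-MineSweeper-Group1_ForkedbyGroup2forProject2 | minesweeper.py | hidden_neighbors
-- ===== SOURCE A (Python) =====
-- def hidden_neighbors(row, col, revealed, flagged, board_rows, board_cols):
--     '''For a given cell (row, col), returns the number of neighboring cells that are not revealed or flagged'''
--     hidden = 0
--     for i in range(-1, 2):
--         if row+i >= 0 and row+i < board_rows:
--             for j in range(-1, 2):
--                 if (col+j >= 0 and col+j < board_cols) and (i != 0 or j != 0):
--                     if ((row+i, col+j) not in revealed) and ((row+i, col+j) not in flagged):
--                         hidden += 1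
--     return hidden
-- ===== SOURCE B (Python) =====
-- def hidden_neighbors(row, col, revealed, flagged, board_rows, board_cols):
--     '''For a given cell (row, col), returns the number of neighboring cells that are not revealed or flagged'''
--     # Closed-form count of in-bounds neighbors, minus the distinct occupied ones
--     # found by scanning the revealed/flagged lists (no 3x3 enumeration).
--     rows_span = max(min(row + 1, board_rows - 1) - max(row - 1, 0) + 1, 0)
--     cols_span = max(min(col + 1, board_cols - 1) - max(col - 1, 0) + 1, 0)
--     total = rows_span * cols_span
--     if 0 <= row < board_rows and 0 <= col < board_cols:
--         total -= 1
--     seen = set()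
--     for r, c in revealed:
--         if abs(r - row) <= 1 and abs(c - col) <= 1 and (r, c) != (row, col) \
--                 and 0 <= r < board_rows and 0 <= c < board_cols:
--             seen.add((r, c))
--     for r, c in flagged:
--         if abs(r - row) <= 1 and abs(c - col) <= 1 and (r, c) != (row, col) \
--                 and 0 <= r < board_rows and 0 <= c < board_cols:
--             seen.add((r, c))
--     return total - len(seen)
-- ===== Notes on version B (the rewrite author's own statement) =====
-- stated objective: alternative
-- what changed: B never enumerates the 3x3 neighborhood: it computes the number of in-bounds neighbors by a closed-form row-span*col-span formula and subtracts the number of distinct occupied neighbors found by a single scan over the revealed and flagged lists with Chebyshev-distance and bounds tests.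
import Mathlib
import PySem

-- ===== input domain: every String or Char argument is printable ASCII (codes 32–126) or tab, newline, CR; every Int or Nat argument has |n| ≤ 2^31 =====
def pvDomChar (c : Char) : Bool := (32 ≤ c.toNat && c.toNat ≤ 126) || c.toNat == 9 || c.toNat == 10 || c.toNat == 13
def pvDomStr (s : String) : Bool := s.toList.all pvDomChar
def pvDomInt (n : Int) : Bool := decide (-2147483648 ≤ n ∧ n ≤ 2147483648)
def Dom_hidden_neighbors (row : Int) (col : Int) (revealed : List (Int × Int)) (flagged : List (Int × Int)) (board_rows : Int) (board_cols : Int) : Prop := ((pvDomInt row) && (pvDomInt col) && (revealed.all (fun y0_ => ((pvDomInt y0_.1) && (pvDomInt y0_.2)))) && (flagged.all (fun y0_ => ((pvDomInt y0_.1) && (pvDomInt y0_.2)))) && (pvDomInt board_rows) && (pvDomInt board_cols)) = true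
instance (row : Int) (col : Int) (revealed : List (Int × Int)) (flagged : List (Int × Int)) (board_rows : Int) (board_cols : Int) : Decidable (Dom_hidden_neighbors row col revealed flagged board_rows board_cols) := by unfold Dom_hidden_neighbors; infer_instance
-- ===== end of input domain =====

-- B never enumerates the 3x3 neighborhood: it computes the in-bounds neighbor total by a
-- closed-form span formula and subtracts the distinct occupied neighbors found by one scan
-- of the revealed and flagged lists; objective: alternative.

-- ===== PORT A =====
def hidden_neighbors (row : Int) (col : Int) (revealed : List (Int × Int)) (flagged : List (Int × Int)) (board_rows : Int) (board_cols : Int) : Int :=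
  (PySem.List.pyRange (-1) 2 1).foldl (fun hidden i =>
    if 0 ≤ row + i ∧ row + i < board_rows then
      (PySem.List.pyRange (-1) 2 1).foldl (fun hidden j =>
        if (0 ≤ col + j ∧ col + j < board_cols) ∧ (i ≠ 0 ∨ j ≠ 0) then
          if (row + i, col + j) ∉ revealed ∧ (row + i, col + j) ∉ flagged then hidden + 1
          else hidden
        else hidden) hidden
    else hidden) 0

-- ===== PORT B =====
-- the test applied to each scanned cell: Chebyshev distance ≤ 1, not the cell itself, in bounds
def pvNb (row : Int) (col : Int) (board_rows : Int) (board_cols : Int) (r : Int) (c : Int) : Bool :=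
  decide (|r - row| ≤ 1 ∧ |c - col| ≤ 1 ∧ ¬(r = row ∧ c = col) ∧
          (0 ≤ r ∧ r < board_rows) ∧ (0 ≤ c ∧ c < board_cols))

def hidden_neighbors_alt (row : Int) (col : Int) (revealed : List (Int × Int)) (flagged : List (Int × Int)) (board_rows : Int) (board_cols : Int) : Int :=
  let rows_span := max (min (row + 1) (board_rows - 1) - max (row - 1) 0 + 1) 0
  let cols_span := max (min (col + 1) (board_cols - 1) - max (col - 1) 0 + 1) 0
  let total0 := rows_span * cols_span
  let total := if (0 ≤ row ∧ row < board_rows) ∧ (0 ≤ col ∧ col < board_cols) then total0 - 1 else total0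
  let seen0 : PySem.Set (Int × Int) :=
    revealed.foldl (fun s p => if pvNb row col board_rows board_cols p.1 p.2 then PySem.Set.add s p else s) PySem.Set.empty
  let seen : PySem.Set (Int × Int) :=
    flagged.foldl (fun s p => if pvNb row col board_rows board_cols p.1 p.2 then PySem.Set.add s p else s) seen0
  total - PySem.Set.len seen

-- ===== PRECONDITION & SPEC =====
def Spec_hidden_neighbors (row : Int) (col : Int) (revealed : List (Int × Int)) (flagged : List (Int × Int)) (board_rows : Int) (board_cols : Int) (out : Int) : Prop := out = hidden_neighbors_alt row col revealed flagged board_rows board_cols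
instance (row : Int) (col : Int) (revealed : List (Int × Int)) (flagged : List (Int × Int)) (board_rows : Int) (board_cols : Int) (out : Int) : Decidable (Spec_hidden_neighbors row col revealed flagged board_rows board_cols out) := by unfold Spec_hidden_neighbors; infer_instance

-- ===== CLAIM (what is proved, stated in full; the proofs are below) =====
def Claim_equal_hidden_neighbors : Prop := ∀ (row : Int) (col : Int) (revealed : List (Int × Int)) (flagged : List (Int × Int)) (board_rows : Int) (board_cols : Int), Dom_hidden_neighbors row col revealed flagged board_rows board_cols → Spec_hidden_neighbors row col revealed flagged board_rows board_cols (hidden_neighbors row col revealed flagged board_rows board_cols)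

-- ===== LEMMAS AND PROOFS =====

-- integer indicator of a proposition, proof-side only
def pvI (P : Prop) [Decidable P] : Int := if P then 1 else 0

theorem pv_pyRange_m1_2 : PySem.List.pyRange (-1) 2 1 = [-1, 0, 1] := by decide

theorem pv_foldl_shift (g : Int → Int → Int) (h : ∀ acc x, g acc x = acc + g 0 x) :
    ∀ (l : List Int) (acc : Int), l.foldl g acc = acc + l.foldl g 0 := by
  intro l
  induction l with
  | nil => intro acc; simp
  | cons x xs ih =>
    intro acc
    simp only [List.foldl_cons]
    rw [ih (g acc x), ih (g 0 x), h acc x]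
    ring

theorem pv_foldl3 (g : Int → Int → Int) (h : ∀ acc x, g acc x = acc + g 0 x) (a b c : Int) :
    [a, b, c].foldl g 0 = g 0 a + g 0 b + g 0 c := by
  simp only [List.foldl_cons, List.foldl_nil]
  rw [h (g (g 0 a) b) c, h (g 0 a) b]

theorem pv_ite_add2 (R : Prop) [Decidable R] (a b : Int) :
    (if R then a + b else 0) = (if R then a else 0) + (if R then b else 0) := by
  split_ifs <;> ring

theorem pv_term (R C M : Prop) [Decidable R] [Decidable C] [Decidable M] :
    (if R then (if C then (if M then (1:Int) else 0) else 0) else 0) = if M ∧ R ∧ C then 1 else 0 := by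
  split_ifs <;> simp_all

-- an A-term becomes a product of indicators
theorem pv_a_term (P Q R C : Prop) [Decidable P] [Decidable Q] [Decidable R] [Decidable C] :
    (if (¬P ∧ ¬Q) ∧ R ∧ C then (1:Int) else 0) = pvI R * pvI C * (1 - pvI (P ∨ Q)) := by
  unfold pvI; split_ifs <;> simp_all

theorem pv_if_sub (row col br bc : Int) (t : Int) :
    (if (0 ≤ row ∧ row < br) ∧ (0 ≤ col ∧ col < bc) then t - 1 else t)
      = t - pvI (0 ≤ row + 0 ∧ row + 0 < br) * pvI (0 ≤ col + 0 ∧ col + 0 < bc) := by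
  unfold pvI; split_ifs <;> omega

-- closed-form span = sum of three row indicators
theorem pv_span (x n : Int) :
    max (min (x + 1) (n - 1) - max (x - 1) 0 + 1) 0
      = pvI (0 ≤ x + -1 ∧ x + -1 < n) + pvI (0 ≤ x + 0 ∧ x + 0 < n) + pvI (0 ≤ x + 1 ∧ x + 1 < n) := by
  unfold pvI; split_ifs <;> omega

-- a guarded-add fold is a fold of adds over the filtered list
theorem pv_fold_filter (f : Int × Int → Bool) (L : List (Int × Int)) (s : PySem.Set (Int × Int)) :
    L.foldl (fun s p => if f p then PySem.Set.add s p else s) s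
      = (L.filter f).foldl PySem.Set.add s := by
  induction L generalizing s with
  | nil => rfl
  | cons p L ih =>
    by_cases h : f p <;> simp [h, ih]

-- the nine candidate coordinates around (row, col)
def pvNine (row col : Int) : List (Int × Int) :=
  [(row + -1, col + -1), (row + -1, col + 0), (row + -1, col + 1),
   (row + 0, col + -1), (row + 0, col + 0), (row + 0, col + 1),
   (row + 1, col + -1), (row + 1, col + 0), (row + 1, col + 1)]

theorem pv_nine_nodup (row col : Int) : (pvNine row col).Nodup := by
  simp [pvNine, Prod.ext_iff]

theorem pv_mem_nine (row col : Int) (x : Int × Int)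
    (h1 : |x.1 - row| ≤ 1) (h2 : |x.2 - col| ≤ 1) : x ∈ pvNine row col := by
  obtain ⟨a, b⟩ := x
  simp only [abs_le] at h1 h2
  simp only [pvNine, List.mem_cons, List.not_mem_nil, or_false, Prod.mk.injEq]
  omega

-- size of the seen set = number of candidate cells passing the test and present in the lists
theorem pv_seen_len (row col br bc : Int) (rev flag : List (Int × Int)) :
    PySem.Set.len (PySem.Set.ofList ((rev ++ flag).filter (fun p => pvNb row col br bc p.1 p.2)))
      = ((pvNine row col).countP
          (fun p => pvNb row col br bc p.1 p.2 && decide (p ∈ rev ++ flag)) : Int) := by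
  have hperm : (PySem.Set.ofList ((rev ++ flag).filter (fun p => pvNb row col br bc p.1 p.2))).Perm
      ((pvNine row col).filter (fun p => pvNb row col br bc p.1 p.2 && decide (p ∈ rev ++ flag))) := by
    rw [List.perm_ext_iff_of_nodup (PySem.Set.nodup_ofList _)
        ((pv_nine_nodup row col).filter _)]
    intro x
    rw [PySem.Set.mem_ofList, List.mem_filter, List.mem_filter]
    constructor
    · rintro ⟨hm, hf⟩
      have hx := of_decide_eq_true hf
      refine ⟨pv_mem_nine row col x hx.1 hx.2.1, ?_⟩
      simp [hf, hm]
    · rintro ⟨-, hf⟩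
      simp only [Bool.and_eq_true, decide_eq_true_eq] at hf
      exact ⟨hf.2, hf.1⟩
  rw [PySem.Set.len, hperm.length_eq, ← List.countP_eq_length_filter]

-- a seen-count term for a genuine neighbor offset becomes a product of indicators
theorem pv_seen_if (row col br bc i j : Int) (rev flag : List (Int × Int))
    (hi : |i| ≤ 1) (hj : |j| ≤ 1) (hij : ¬(i = 0 ∧ j = 0)) :
    (if (pvNb row col br bc (row + i) (col + j) && decide ((row + i, col + j) ∈ rev ++ flag)) = true
      then (1:Int) else 0)
      = pvI (0 ≤ row + i ∧ row + i < br) * pvI (0 ≤ col + j ∧ col + j < bc)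
          * pvI ((row + i, col + j) ∈ rev ∨ (row + i, col + j) ∈ flag) := by
  rw [abs_le] at hi hj
  have hcond : (pvNb row col br bc (row + i) (col + j) && decide ((row + i, col + j) ∈ rev ++ flag)) = true ↔
      ((0 ≤ row + i ∧ row + i < br) ∧ (0 ≤ col + j ∧ col + j < bc) ∧
        ((row + i, col + j) ∈ rev ∨ (row + i, col + j) ∈ flag)) := by
    simp only [pvNb, Bool.and_eq_true, decide_eq_true_eq, List.mem_append, abs_le]
    constructor
    · rintro ⟨⟨_, _, _, hR, hC⟩, hm⟩; exact ⟨hR, hC, hm⟩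
    · rintro ⟨hR, hC, hm⟩
      exact ⟨⟨⟨by omega, by omega⟩, ⟨by omega, by omega⟩, by omega, hR, hC⟩, hm⟩
  unfold pvI
  simp only [hcond]
  by_cases hR : (0 ≤ row + i ∧ row + i < br) <;>
    by_cases hC : (0 ≤ col + j ∧ col + j < bc) <;>
    by_cases hm : ((row + i, col + j) ∈ rev ∨ (row + i, col + j) ∈ flag) <;>
    simp [hR, hC, hm]

-- the center term of the seen count is zero
theorem pv_seen_center (row col br bc : Int) (rev flag : List (Int × Int)) :
    (if (pvNb row col br bc (row + 0) (col + 0) && decide ((row + 0, col + 0) ∈ rev ++ flag)) = true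
      then (1:Int) else 0) = 0 := by
  simp [pvNb]

-- ===== VERDICT (by name: the statement is the Claim_ definition above) =====
theorem hidden_neighbors_spec : Claim_equal_hidden_neighbors := by
  intro row col revealed flagged br bc _
  unfold Spec_hidden_neighbors hidden_neighbors hidden_neighbors_alt
  rw [pv_pyRange_m1_2]
  dsimp only
  rw [pv_fold_filter, pv_fold_filter, ← List.foldl_append, ← List.filter_append]
  rw [show (PySem.Set.empty : PySem.Set (Int × Int)) = [] from rfl,
    ← PySem.Set.ofList_eq_foldl, pv_seen_len]
  simp only [pvNine, List.countP_cons, List.countP_nil]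
  push_cast
  rw [pv_seen_center]
  rw [pv_seen_if row col br bc (-1) (-1) revealed flagged (by decide) (by decide) (by decide),
      pv_seen_if row col br bc (-1) 0 revealed flagged (by decide) (by decide) (by decide),
      pv_seen_if row col br bc (-1) 1 revealed flagged (by decide) (by decide) (by decide),
      pv_seen_if row col br bc 0 (-1) revealed flagged (by decide) (by decide) (by decide),
      pv_seen_if row col br bc 0 1 revealed flagged (by decide) (by decide) (by decide),
      pv_seen_if row col br bc 1 (-1) revealed flagged (by decide) (by decide) (by decide),
      pv_seen_if row col br bc 1 0 revealed flagged (by decide) (by decide) (by decide),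
      pv_seen_if row col br bc 1 1 revealed flagged (by decide) (by decide) (by decide)]
  have hG : ∀ (i : Int), ∀ (acc j : Int),
      (fun hidden j => if (0 ≤ col + j ∧ col + j < bc) ∧ (i ≠ 0 ∨ j ≠ 0) then
          if (row + i, col + j) ∉ revealed ∧ (row + i, col + j) ∉ flagged then hidden + 1 else hidden
        else hidden) acc j
      = acc + (fun hidden j => if (0 ≤ col + j ∧ col + j < bc) ∧ (i ≠ 0 ∨ j ≠ 0) then
          if (row + i, col + j) ∉ revealed ∧ (row + i, col + j) ∉ flagged then hidden + 1 else hidden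
        else hidden) 0 j := by
    intro i acc j
    dsimp only
    split_ifs <;> omega
  have hF : ∀ (acc i : Int),
      (fun hidden i => if 0 ≤ row + i ∧ row + i < br then
          List.foldl (fun hidden j => if (0 ≤ col + j ∧ col + j < bc) ∧ (i ≠ 0 ∨ j ≠ 0) then
              if (row + i, col + j) ∉ revealed ∧ (row + i, col + j) ∉ flagged then hidden + 1 else hidden
            else hidden) hidden [-1, 0, 1]
        else hidden) acc i
      = acc + (fun hidden i => if 0 ≤ row + i ∧ row + i < br then
          List.foldl (fun hidden j => if (0 ≤ col + j ∧ col + j < bc) ∧ (i ≠ 0 ∨ j ≠ 0) then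
              if (row + i, col + j) ∉ revealed ∧ (row + i, col + j) ∉ flagged then hidden + 1 else hidden
            else hidden) hidden [-1, 0, 1]
        else hidden) 0 i := by
    intro acc i
    dsimp only
    by_cases hb : 0 ≤ row + i ∧ row + i < br
    · simp only [if_pos hb]
      exact pv_foldl_shift _ (hG i) _ acc
    · simp only [if_neg hb]
      omega
  rw [pv_foldl3 _ hF]
  rw [pv_foldl3 _ (hG (-1)), pv_foldl3 _ (hG 0), pv_foldl3 _ (hG 1)]
  have hzFF : (((0:Int) ≠ 0) ∨ ((0:Int) ≠ 0)) = False := by simp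
  have hzA : ∀ (b : Int), b ≠ 0 → ∀ (a : Int), ((a ≠ 0) ∨ (b ≠ 0)) = True := by
    intro b hb a; simp [hb]
  have hzB : ∀ (a : Int), a ≠ 0 → ∀ (b : Int), ((a ≠ 0) ∨ (b ≠ 0)) = True := by
    intro a ha b; simp [ha]
  simp only [hzFF, hzA (-1) (by decide), hzA 1 (by decide), hzB (-1) (by decide),
    hzB 1 (by decide), and_true, and_false, if_false, zero_add, add_zero,
    pv_ite_add2, pv_term, pv_a_term]
  rw [pv_span row br, pv_span col bc, pv_if_sub row col br bc]
  simp only [add_zero]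
  ring
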